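-- pv_equiv track=rewrite | github.com/csci595-research-lit-spring-2024/595-class-project-spring-2024-Mokshithy | src/src/responses/1/q_1090_largestValuesFromLabels.py | largestValsFromLabels
-- ===== SOURCE A (Python) =====
-- from typing import List
--
-- from collections import defaultdict
--
-- def largestValsFromLabels(
--     values: List[int], labels: List[int], numWanted: int, useLimit: int
-- ) -> int:
--     items = sorted(zip(values, labels), reverse=True)
--     label_count = defaultdict(int)
--     result = 0
--     num_selected = 0
--
--     for value, label in items:
--         if num_selected == numWanted:
--             break
--         if label_count[label] < useLimit:
--             result += value
--             label_count[label] += 1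
--             num_selected += 1
--
--     return result
-- ===== SOURCE B (Python) =====
-- from collections import defaultdict
--
--
-- def largestValsFromLabels(values, labels, numWanted, useLimit):
--     groups = defaultdict(list)
--     for value, label in zip(values, labels):
--         groups[label].append(value)
--     pool = []
--     for vals in groups.values():
--         vals.sort(reverse=True)
--         pool.extend(v for i, v in enumerate(vals) if i < useLimit)
--     pool.sort(reverse=True)
--     return sum(v for i, v in enumerate(pool) if i < numWanted)
-- ===== Notes on version B (the rewrite author's own statement) =====
-- stated objective: alternative
-- what changed: Replaces A's single global greedy sweep (sort all pairs, scan with a per-label counter and a selected-count break) by a per-label decomposition: group values by label in a dict, truncate each group to its top useLimit values, then sum the top numWanted of the pooled survivors.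
-- outside the precondition, e.g. on largestValsFromLabels([5, 3], [1, 2], -1, 1): A returns 8, B returns 0
import Mathlib
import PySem

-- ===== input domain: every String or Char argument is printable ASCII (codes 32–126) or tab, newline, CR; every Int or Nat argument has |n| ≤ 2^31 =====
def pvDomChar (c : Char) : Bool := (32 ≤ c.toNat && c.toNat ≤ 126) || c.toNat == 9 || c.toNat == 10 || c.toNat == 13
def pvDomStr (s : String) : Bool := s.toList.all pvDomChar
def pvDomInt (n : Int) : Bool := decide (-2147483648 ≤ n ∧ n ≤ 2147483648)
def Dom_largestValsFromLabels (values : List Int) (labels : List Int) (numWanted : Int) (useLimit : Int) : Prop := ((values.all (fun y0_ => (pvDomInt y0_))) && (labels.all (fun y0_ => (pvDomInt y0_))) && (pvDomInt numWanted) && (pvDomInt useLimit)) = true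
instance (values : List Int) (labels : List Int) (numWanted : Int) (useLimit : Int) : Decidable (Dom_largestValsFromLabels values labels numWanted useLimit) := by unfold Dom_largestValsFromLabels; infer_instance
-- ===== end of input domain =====

-- B regroups the work per label (dict of label → values, per-label truncation, one global
-- top-numWanted pick) instead of A's single greedy sweep; same cost, different decomposition.

-- ===== PORT A =====
-- the for-loop of A: state = (label_count, result, num_selected); 'break' returns result
def pvGoA (numWanted useLimit : Int) : List (Int × Int) → PySem.Dict Int Int → Int → Int → Int
  | [], _, result, _ => result
  | (value, label) :: rest, cnt, result, numSel =>
    if numSel = numWanted then result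
    else if cnt.getD label 0 < useLimit then
      pvGoA numWanted useLimit rest (cnt.insert label (cnt.getD label 0 + 1)) (result + value) (numSel + 1)
    else
      pvGoA numWanted useLimit rest cnt result numSel

def largestValsFromLabels (values : List Int) (labels : List Int) (numWanted : Int) (useLimit : Int) : Int :=
  pvGoA numWanted useLimit
    (PySem.List.sorted2 (values.zip labels) (fun p => p.1) (fun p => p.2) true)
    PySem.Dict.empty 0 0

-- ===== PORT B =====
-- '[v for i, v in enumerate(xs) if i < limit]' (used twice in Source B)
def pvKeep (limit : Int) (xs : List Int) : List Int :=
  ((PySem.List.enumerate xs 0).filter (fun p => decide (p.1 < limit))).map (fun p => p.2)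

def largestValsFromLabels_alt (values : List Int) (labels : List Int) (numWanted : Int) (useLimit : Int) : Int :=
  let groups := (values.zip labels).foldl
    (fun d p => d.modify p.2 [] (fun cur => cur ++ [p.1])) PySem.Dict.empty
  let pool := groups.values.foldl
    (fun acc vals => acc ++ pvKeep useLimit (PySem.List.sorted vals (fun v => v) true)) []
  (pvKeep numWanted (PySem.List.sorted pool (fun v => v) true)).sum

-- ===== PRECONDITION & SPEC =====
-- Pre_ restricts to the task's natural domain of counts: numWanted ≥ 0. For a negative
-- numWanted (excluded) A's stop counter never equals the target so A sums every
-- per-label-feasible value, while B's rank-based selection takes none and returns 0.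
def Pre_largestValsFromLabels (values : List Int) (labels : List Int) (numWanted : Int) (useLimit : Int) : Prop :=
  0 ≤ numWanted
instance (values : List Int) (labels : List Int) (numWanted : Int) (useLimit : Int) : Decidable (Pre_largestValsFromLabels values labels numWanted useLimit) := by unfold Pre_largestValsFromLabels; infer_instance

def pvWitness_largestValsFromLabels : List Int × List Int × Int × Int := ([5, 3, 4], [1, 1, 2], 2, 1)

def Spec_largestValsFromLabels (values : List Int) (labels : List Int) (numWanted : Int) (useLimit : Int) (out : Int) : Prop := out = largestValsFromLabels_alt values labels numWanted useLimit
instance (values : List Int) (labels : List Int) (numWanted : Int) (useLimit : Int) (out : Int) : Decidable (Spec_largestValsFromLabels values labels numWanted useLimit out) := by unfold Spec_largestValsFromLabels; infer_instance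

-- ===== CLAIM (what is proved, stated in full; the proofs are below) =====
def Claim_equal_largestValsFromLabels : Prop := ∀ (values : List Int) (labels : List Int) (numWanted : Int) (useLimit : Int), Dom_largestValsFromLabels values labels numWanted useLimit → Pre_largestValsFromLabels values labels numWanted useLimit → Spec_largestValsFromLabels values labels numWanted useLimit (largestValsFromLabels values labels numWanted useLimit)

-- ===== LEMMAS AND PROOFS =====

-- the items of A's loop that pass the label-limit test, with their labels (proof-side helper)
def pvFiltP (useLimit : Int) : List (Int × Int) → PySem.Dict Int Int → List (Int × Int)
  | [], _ => []
  | (value, label) :: rest, cnt =>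
    if cnt.getD label 0 < useLimit then
      (value, label) :: pvFiltP useLimit rest (cnt.insert label (cnt.getD label 0 + 1))
    else
      pvFiltP useLimit rest cnt

-- the descending lexicographic order established by sorted2 (reverse=True)
def pvLexGe (a b : Int × Int) : Prop := b.1 < a.1 ∨ (b.1 = a.1 ∧ b.2 ≤ a.2)

-- the comparator sorted2 (reverse=True) inserts with
def pvBef (a b : Int × Int) : Bool :=
  decide (b.1 < a.1) || !decide (a.1 < b.1) && decide (b.2 < a.2)

theorem pvKeep_eq_take (xs : List Int) (n : Int) : ∀ (s : Int),
    ((PySem.List.enumerate xs s).filter (fun p => decide (p.1 < n))).map (fun p => p.2)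
      = xs.take (n - s).toNat := by
  induction xs with
  | nil => intro s; simp [PySem.List.enumerate]
  | cons x t ih =>
    intro s
    rw [PySem.List.enumerate_cons]
    by_cases h : s < n
    · have h1 : (n - s).toNat = (n - (s + 1)).toNat + 1 := by omega
      simp only [List.filter_cons, decide_eq_true_eq, h, if_pos, List.map_cons, h1,
        List.take_succ_cons]
      simp [ih (s + 1)]
    · have h1 : (n - s).toNat = 0 := by omega
      have h2 : (n - (s + 1)).toNat = 0 := by omega
      simp only [List.filter_cons, h1, List.take_zero]
      simp only [decide_eq_true_eq, h]
      have := ih (s + 1)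
      rw [h2] at this
      simpa [h] using this

theorem pvKeep_take (n : Int) (xs : List Int) : pvKeep n xs = xs.take n.toNat := by
  have := pvKeep_eq_take xs n 0
  simpa [pvKeep] using this

theorem pvGoA_nonneg (numWanted useLimit : Int) :
    ∀ (T : List (Int × Int)) (cnt : PySem.Dict Int Int) (res k : Int), 0 ≤ k → k ≤ numWanted →
      pvGoA numWanted useLimit T cnt res k
        = res + (((pvFiltP useLimit T cnt).map (fun p => p.1)).take (numWanted - k).toNat).sum := by
  intro T
  induction T with
  | nil => intro cnt res k _ _; simp [pvGoA, pvFiltP]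
  | cons p rest ih =>
    obtain ⟨v, l⟩ := p
    intro cnt res k hk0 hkN
    by_cases hk : k = numWanted
    · have h0 : (numWanted - k).toNat = 0 := by omega
      simp [pvGoA, hk]
    · have hklt : k < numWanted := lt_of_le_of_ne hkN hk
      by_cases hc : cnt.getD l 0 < useLimit
      · have h1 : (numWanted - k).toNat = (numWanted - (k + 1)).toNat + 1 := by omega
        rw [pvGoA, if_neg hk, if_pos hc, ih _ _ _ (by omega) (by omega)]
        simp only [pvFiltP, if_pos hc, List.map_cons, h1, List.take_succ_cons, List.sum_cons]
        ring
      · rw [pvGoA, if_neg hk, if_neg hc, ih _ _ _ hk0 hkN]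
        simp [pvFiltP, hc]

theorem pvFiltP_sublist (useLimit : Int) :
    ∀ (T : List (Int × Int)) (cnt : PySem.Dict Int Int), (pvFiltP useLimit T cnt).Sublist T := by
  intro T
  induction T with
  | nil => intro cnt; simp [pvFiltP]
  | cons p rest ih =>
    obtain ⟨v, l⟩ := p
    intro cnt
    by_cases hc : cnt.getD l 0 < useLimit
    · simp only [pvFiltP, if_pos hc]
      exact (ih _).cons₂ (v, l)
    · simp only [pvFiltP, if_neg hc]
      exact (ih _).cons (v, l)

theorem pvFiltP_fiber (useLimit : Int) (l : Int) :
    ∀ (T : List (Int × Int)) (cnt : PySem.Dict Int Int),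
      (pvFiltP useLimit T cnt).filter (fun x => x.2 == l)
        = (T.filter (fun x => x.2 == l)).take (useLimit - cnt.getD l 0).toNat := by
  intro T
  induction T with
  | nil => intro cnt; simp [pvFiltP]
  | cons p rest ih =>
    obtain ⟨v, m⟩ := p
    intro cnt
    by_cases hc : cnt.getD m 0 < useLimit
    · by_cases hl : m = l
      · subst hl
        have hins : (cnt.insert m (cnt.getD m 0 + 1)).getD m 0 = cnt.getD m 0 + 1 := by
          simp [PySem.Dict.getD_insert cnt m m]
        have h1 : (useLimit - cnt.getD m 0).toNat
            = (useLimit - (cnt.getD m 0 + 1)).toNat + 1 := by omega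
        simp only [pvFiltP, if_pos hc, List.filter_cons, BEq.rfl, if_pos, ih, hins, h1]
        simp [List.take_succ_cons]
      · have hins : (cnt.insert m (cnt.getD m 0 + 1)).getD l 0 = cnt.getD l 0 := by
          simp [PySem.Dict.getD_insert, Ne.symm hl]
        simp only [pvFiltP, if_pos hc, List.filter_cons]
        have hne : ((v, m).2 == l) = false := by simp [hl]
        rw [hne, ih, hins]
        simp
    · by_cases hl : m = l
      · subst hl
        have h1 : (useLimit - cnt.getD m 0).toNat = 0 := by omega
        simp [pvFiltP, hc, ih, h1]
      · have hne : ((v, m).2 == l) = false := by simp [hl]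
        simp [pvFiltP, hc, ih, hne]

-- any list of pairs is a permutation of its label fibers, listed along any Nodup cover
theorem pvPerm_flatMap_fibers :
    ∀ (L : List Int) (P : List (Int × Int)), L.Nodup → (∀ x ∈ P, x.2 ∈ L) →
      P.Perm (L.flatMap (fun l => P.filter (fun x => x.2 == l))) := by
  intro L
  induction L with
  | nil =>
    intro P _ hmem
    cases P with
    | nil => simp
    | cons x t => exact absurd (hmem x (by simp)) (by simp)
  | cons l L' ih =>
    intro P hnd hmem
    have hsplit := List.filter_append_perm (fun x => x.2 == l) P
    have hP' : ∀ x ∈ P.filter (fun x => !(x.2 == l)), x.2 ∈ L' := by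
      intro x hx
      rw [List.mem_filter] at hx
      have := hmem x hx.1
      simp only [List.mem_cons] at this
      rcases this with h | h
      · exfalso; simp [h] at hx
      · exact h
    have hih := ih (P.filter (fun x => !(x.2 == l))) hnd.of_cons hP'
    have hfib : ∀ m ∈ L', (P.filter (fun x => !(x.2 == l))).filter (fun x => x.2 == m)
        = P.filter (fun x => x.2 == m) := by
      intro m hm
      have hml : m ≠ l := by rintro rfl; exact (List.nodup_cons.mp hnd).1 hm
      rw [List.filter_filter]
      apply List.filter_congr
      intro x _
      by_cases h : x.2 = m
      · simp [h, hml]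
      · simp [h]
    have hcongr : L'.flatMap (fun m => (P.filter (fun x => !(x.2 == l))).filter (fun x => x.2 == m))
        = L'.flatMap (fun m => P.filter (fun x => x.2 == m)) := by
      simp only [List.flatMap_def]
      exact congrArg List.flatten (List.map_congr_left hfib)
    rw [List.flatMap_cons]
    rw [hcongr] at hih
    exact hsplit.symm.trans (hih.append_left _)

theorem pvLexGe_trans {a b c : Int × Int} (h1 : pvLexGe a b) (h2 : pvLexGe b c) : pvLexGe a c := by
  unfold pvLexGe at *; omega

theorem pvLexGe_of_bef {a b : Int × Int} (h : pvBef a b = true) : pvLexGe a b := by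
  unfold pvBef at h; unfold pvLexGe
  simp only [Bool.or_eq_true, Bool.and_eq_true, Bool.not_eq_true', decide_eq_true_eq,
    decide_eq_false_iff_not] at h
  omega

theorem pvLexGe_of_not_bef {a b : Int × Int} (h : ¬ pvBef a b = true) : pvLexGe b a := by
  unfold pvBef at h; unfold pvLexGe
  simp only [Bool.or_eq_true, Bool.and_eq_true, Bool.not_eq_true', decide_eq_true_eq,
    decide_eq_false_iff_not, not_or, not_and] at h
  omega

theorem pvPairwise_insertBy (x : Int × Int) :
    ∀ (acc : List (Int × Int)), acc.Pairwise pvLexGe →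
      (PySem.List.insertBy pvBef x acc).Pairwise pvLexGe := by
  intro acc
  induction acc with
  | nil => intro _; simp [PySem.List.insertBy]
  | cons y ys ih =>
    intro hp
    rw [PySem.List.insertBy]
    by_cases hb : pvBef x y = true
    · rw [if_pos hb]
      refine List.pairwise_cons.mpr ⟨?_, hp⟩
      intro z hz
      rcases List.mem_cons.mp hz with rfl | hz
      · exact pvLexGe_of_bef hb
      · exact pvLexGe_trans (pvLexGe_of_bef hb) ((List.pairwise_cons.mp hp).1 z hz)
    · rw [if_neg hb]
      refine List.pairwise_cons.mpr ⟨?_, ih (List.pairwise_cons.mp hp).2⟩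
      intro z hz
      rcases (PySem.List.mem_insertBy pvBef x z ys).mp hz with rfl | hz
      · exact pvLexGe_of_not_bef hb
      · exact (List.pairwise_cons.mp hp).1 z hz

theorem pvPairwise_foldl (xs : List (Int × Int)) :
    ∀ (acc : List (Int × Int)), acc.Pairwise pvLexGe →
      (xs.foldl (fun acc x => PySem.List.insertBy pvBef x acc) acc).Pairwise pvLexGe := by
  induction xs with
  | nil => intro acc h; simpa
  | cons x t ih => intro acc h; exact ih _ (pvPairwise_insertBy x acc h)

theorem pvSorted2_pairwise (xs : List (Int × Int)) :
    (PySem.List.sorted2 xs (fun p => p.1) (fun p => p.2) true).Pairwise pvLexGe := by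
  have h : PySem.List.sorted2 xs (fun p => p.1) (fun p => p.2) true
      = xs.foldl (fun acc x => PySem.List.insertBy pvBef x acc) [] := rfl
  rw [h]
  exact pvPairwise_foldl xs [] (by simp)

theorem pvNegPair {l : List Int} (h : l.Pairwise (fun a b => b ≤ a)) :
    l.Pairwise (fun a b => (fun v : Int => -v) a ≤ (fun v : Int => -v) b) :=
  h.imp (by intro a b hab; simpa using hab)

-- per label: the label-l entries of the globally sorted list are that label's values sorted
theorem pvLab (values labels : List Int) (k : Int) :
    ((PySem.List.sorted2 (values.zip labels) (fun p => p.1) (fun p => p.2) true).filter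
        (fun x => x.2 == k)).map (fun p => p.1)
      = PySem.List.sorted
          (((values.zip labels).filter (fun p => p.2 == k)).map (fun p => p.1)) (fun v => v) true := by
  apply PySem.List.eq_of_perm_of_pairwise_le_of_injective (fun v : Int => -v)
    (fun a b hab => by simpa using hab)
  · exact ((PySem.List.sorted2_perm (values.zip labels) _ _ true).filter _|>.map _).trans
      (PySem.List.sorted_perm _ _ _).symm
  · apply pvNegPair
    rw [List.pairwise_map]
    exact (List.Pairwise.sublist List.filter_sublist
      (pvSorted2_pairwise (values.zip labels))).imp
      (by intro a b hab; rcases hab with h | ⟨h, _⟩ <;> omega)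
  · exact pvNegPair (PySem.List.sorted_pairwise_rev _ _)

-- the heart: A's accepted values, in loop order, ARE B's descending-sorted pool
theorem pvMain (values labels : List Int) (useLimit : Int) :
    (pvFiltP useLimit
        (PySem.List.sorted2 (values.zip labels) (fun p => p.1) (fun p => p.2) true)
        PySem.Dict.empty).map (fun p => p.1)
      = PySem.List.sorted
          (((values.zip labels).foldl
              (fun d p => d.modify p.2 [] (fun cur => cur ++ [p.1])) PySem.Dict.empty).values.foldl
            (fun acc vals => acc ++ pvKeep useLimit (PySem.List.sorted vals (fun v => v) true)) [])
          (fun v => v) true := by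
  set Z := values.zip labels with hZ
  set S := PySem.List.sorted2 Z (fun p => p.1) (fun p => p.2) true with hS
  set d := Z.foldl (fun d p => d.modify p.2 [] (fun cur => cur ++ [p.1])) PySem.Dict.empty with hd
  set P := pvFiltP useLimit S PySem.Dict.empty with hP
  have hkeys : d.keys = PySem.Set.update PySem.Dict.empty.keys (Z.map (fun p => p.2)) :=
    PySem.Dict.keys_foldl_modify_key Z (fun p => p.2) [] (fun _ p => fun cur => cur ++ [p.1]) _
  have hnodup : d.keys.Nodup :=
    PySem.Dict.nodup_keys_foldl_modify_key Z (fun p => p.2) [] (fun _ p => fun cur => cur ++ [p.1]) _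
      (by simp [PySem.Dict.keys_empty])
  have hgetD : ∀ c, d.getD c [] = (Z.filter (fun p => p.2 == c)).map (fun p => p.1) := by
    intro c
    have h1 : d = (Z.map Prod.swap).foldl
        (fun d q => d.modify q.1 [] (fun cur => cur ++ [q.2])) PySem.Dict.empty := by
      rw [List.foldl_map]; rfl
    rw [h1, PySem.Dict.getD_foldl_modify_append, List.filter_map]
    simp [Function.comp_def, PySem.Dict.getD_empty]
  have hvals : d.values = d.keys.map (fun k => d.getD k []) :=
    PySem.Dict.values_eq_map_keys d hnodup []
  have hpool : d.values.foldl
      (fun acc vals => acc ++ pvKeep useLimit (PySem.List.sorted vals (fun v => v) true)) []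
      = d.keys.flatMap (fun k =>
          (PySem.List.sorted ((Z.filter (fun p => p.2 == k)).map (fun p => p.1))
            (fun v => v) true).take useLimit.toNat) := by
    rw [PySem.List.foldl_append_eq_flatMap, List.nil_append, hvals, List.flatMap_map]
    congr 1
    funext k
    rw [pvKeep_take, hgetD]
  rw [hpool]
  have hmem : ∀ x ∈ P, x.2 ∈ d.keys := by
    intro x hx
    have hxS : x ∈ S := (pvFiltP_sublist useLimit S PySem.Dict.empty).subset hx
    have hxZ : x ∈ Z := (PySem.List.sorted2_perm Z _ _ true).subset hxS
    rw [hkeys]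
    exact (PySem.Set.mem_update _ _ _).mpr (Or.inr (List.mem_map_of_mem hxZ))
  have hperm1 : P.Perm (d.keys.flatMap (fun k => P.filter (fun x => x.2 == k))) :=
    pvPerm_flatMap_fibers d.keys P hnodup hmem
  have hfib : ∀ k, P.filter (fun x => x.2 == k)
      = (S.filter (fun x => x.2 == k)).take useLimit.toNat := by
    intro k
    rw [hP, pvFiltP_fiber]
    simp [PySem.Dict.getD_empty]
  have hXperm : (P.map (fun p => p.1)).Perm
      (d.keys.flatMap (fun k =>
        (PySem.List.sorted ((Z.filter (fun p => p.2 == k)).map (fun p => p.1))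
          (fun v => v) true).take useLimit.toNat)) := by
    have h2 := hperm1.map (fun p : Int × Int => p.1)
    rw [List.map_flatMap] at h2
    have h3 : ∀ k, (P.filter (fun x => x.2 == k)).map (fun p : Int × Int => p.1)
        = (PySem.List.sorted ((Z.filter (fun p => p.2 == k)).map (fun p => p.1))
            (fun v => v) true).take useLimit.toNat := by
      intro k
      rw [hfib k, List.map_take, pvLab]
    have h4 : d.keys.flatMap (fun k => (P.filter (fun x => x.2 == k)).map (fun p : Int × Int => p.1))
        = d.keys.flatMap (fun k =>
            (PySem.List.sorted ((Z.filter (fun p => p.2 == k)).map (fun p => p.1))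
              (fun v => v) true).take useLimit.toNat) := by
      simp only [List.flatMap_def]
      exact congrArg List.flatten (List.map_congr_left (fun k _ => h3 k))
    rw [h4] at h2
    exact h2
  apply PySem.List.eq_of_perm_of_pairwise_le_of_injective (fun v : Int => -v)
    (fun a b hab => by simpa using hab)
  · exact hXperm.trans (PySem.List.sorted_perm _ _ _).symm
  · apply pvNegPair
    rw [List.pairwise_map]
    exact (List.Pairwise.sublist (pvFiltP_sublist useLimit S PySem.Dict.empty)
      (pvSorted2_pairwise Z)).imp (by intro a b hab; rcases hab with h | ⟨h, _⟩ <;> omega)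
  · exact pvNegPair (PySem.List.sorted_pairwise_rev _ _)

-- ===== VERDICT (by name: the statement is the Claim_ definition above) =====
theorem largestValsFromLabels_spec : Claim_equal_largestValsFromLabels := by
  intro values labels numWanted useLimit _ hN
  have hB : largestValsFromLabels_alt values labels numWanted useLimit
      = (pvKeep numWanted (PySem.List.sorted
          ((((values.zip labels).foldl
              (fun d p => d.modify p.2 [] (fun cur => cur ++ [p.1])) PySem.Dict.empty).values).foldl
            (fun acc vals => acc ++ pvKeep useLimit (PySem.List.sorted vals (fun v => v) true)) [])
          (fun v => v) true)).sum := rfl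
  show largestValsFromLabels values labels numWanted useLimit
      = largestValsFromLabels_alt values labels numWanted useLimit
  rw [largestValsFromLabels, pvGoA_nonneg numWanted useLimit _ _ 0 0 le_rfl hN, zero_add,
    pvMain, hB, pvKeep_take]
  norm_num
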